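-- pv_equiv track=rewrite | github.com/mfouesneau/arxiv_on_deck_2 | arxiv_vanity_on_deck/arxiv_vanity.py | highlight_authors_in_list
-- ===== SOURCE A (Python) =====
-- from typing import Sequence
--
-- def highlight_authors_in_list(author_list: Sequence[str],
--                               hl_list: Sequence[str]) -> Sequence[str]:
--     """ highlight all authors of the paper that match `lst` entries
--
--     :param author_list: the list of authors
--     :param hl_list: the list of authors to highlight
--     :return: the list of authors with the highlighted authors
--     """
--     new_authors = []
--     for author in author_list:
--         found = False
--         for hl in hl_list:
--             if hl in author:
--                 new_authors.append(f"<mark>{author}</mark>")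
--                 found = True
--                 break
--         if (not found):
--             new_authors.append(f"{author}")
--
--     return new_authors
-- ===== SOURCE B (Python) =====
-- # B: position-based scan — walk each author's positions once and test whether any
-- # highlight pattern starts there, instead of A's per-pattern substring searches.
-- def _has_any(author, hl_list):
--     pats = tuple(hl_list)
--     for i in range(len(author) + 1):
--         if author.startswith(pats, i):
--             return True
--     return False
--
-- def highlight_authors_in_list(author_list, hl_list):
--     return ["<mark>%s</mark>" % a if _has_any(a, hl_list) else a
--             for a in author_list]
-- ===== Notes on version B (the rewrite author's own statement) =====
-- stated objective: alternative
-- what changed: A loops over patterns and runs a full substring search (`hl in author`) per pattern; B makes one left-to-right scan over each author's positions and tests at each position whether some pattern starts there (startswith), so the substring-search primitive disappears.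
import Mathlib
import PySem

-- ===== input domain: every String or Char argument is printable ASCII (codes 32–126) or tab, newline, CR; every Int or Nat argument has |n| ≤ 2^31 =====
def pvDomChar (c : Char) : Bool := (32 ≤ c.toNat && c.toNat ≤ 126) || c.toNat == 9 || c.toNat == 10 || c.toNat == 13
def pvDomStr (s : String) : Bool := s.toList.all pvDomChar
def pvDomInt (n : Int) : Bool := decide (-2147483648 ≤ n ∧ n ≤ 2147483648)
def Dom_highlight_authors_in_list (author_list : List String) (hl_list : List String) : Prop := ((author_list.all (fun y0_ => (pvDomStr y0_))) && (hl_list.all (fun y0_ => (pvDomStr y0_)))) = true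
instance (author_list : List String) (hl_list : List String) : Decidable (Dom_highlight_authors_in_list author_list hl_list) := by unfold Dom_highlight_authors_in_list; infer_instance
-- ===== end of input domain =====

-- B replaces A's per-pattern substring searches by a single position scan of each
-- author, testing `startswith` at every position (objective: alternative algorithm).

-- ===== PORT A =====
-- inner 'for hl in hl_list: if hl in author: append mark; break' + trailing plain append
def pvMarkOne (author : String) : List String → String
  | [] => author
  | hl :: rest =>
      if PySem.Str.isIn hl author then "<mark>" ++ author ++ "</mark>"
      else pvMarkOne author rest

def highlight_authors_in_list (author_list : List String) (hl_list : List String) : List String :=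
  author_list.foldl (fun acc author => acc ++ [pvMarkOne author hl_list]) []

-- ===== PORT B =====
-- 'for h in hl_list: if author.startswith(h, i)'
def pvMatchHere (hl_list : List String) (suffix : List Char) : Bool :=
  hl_list.any (fun h => PySem.Chars.startswith suffix h.toList)

-- 'for i in range(len(author) + 1): …' — one scan over the author's positions
def pvScan (hl_list : List String) : List Char → Bool
  | [] => pvMatchHere hl_list []
  | c :: rest => pvMatchHere hl_list (c :: rest) || pvScan hl_list rest

def highlight_authors_in_list_alt (author_list : List String) (hl_list : List String) : List String :=
  author_list.map (fun a => if pvScan hl_list a.toList then "<mark>" ++ a ++ "</mark>" else a)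

-- ===== PRECONDITION & SPEC =====
def Spec_highlight_authors_in_list (author_list : List String) (hl_list : List String) (out : List String) : Prop := out = highlight_authors_in_list_alt author_list hl_list
instance (author_list : List String) (hl_list : List String) (out : List String) : Decidable (Spec_highlight_authors_in_list author_list hl_list out) := by unfold Spec_highlight_authors_in_list; infer_instance

-- ===== CLAIM (what is proved, stated in full; the proofs are below) =====
def Claim_equal_highlight_authors_in_list : Prop := ∀ (author_list : List String) (hl_list : List String), Dom_highlight_authors_in_list author_list hl_list → Spec_highlight_authors_in_list author_list hl_list (highlight_authors_in_list author_list hl_list)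

-- ===== LEMMAS AND PROOFS =====

-- B's position scan finds exactly the patterns occurring as an infix
theorem pvScan_iff (hl_list : List String) (cs : List Char) :
    pvScan hl_list cs = true ↔ ∃ h ∈ hl_list, h.toList <:+: cs := by
  induction cs with
  | nil =>
      simp [pvScan, pvMatchHere, List.any_eq_true, PySem.Chars.startswith_iff]
  | cons c rest ih =>
      simp only [pvScan, Bool.or_eq_true, ih, pvMatchHere, List.any_eq_true,
        PySem.Chars.startswith_iff]
      constructor
      · rintro (⟨h, hm, hp⟩ | ⟨h, hm, hi⟩)
        · exact ⟨h, hm, hp.isInfix⟩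
        · exact ⟨h, hm, List.infix_cons hi⟩
      · rintro ⟨h, hm, hi⟩
        rcases (List.infix_cons_iff).1 hi with hp | hi
        · exact Or.inl ⟨h, hm, hp⟩
        · exact Or.inr ⟨h, hm, hi⟩

-- hence it computes the same Bool as 'any (hl in author)'
theorem pvScan_eq_any (hl_list : List String) (a : String) :
    pvScan hl_list a.toList = hl_list.any (fun h => PySem.Str.isIn h a) := by
  rcases hb : hl_list.any (fun h => PySem.Str.isIn h a) with _ | _
  · rw [Bool.eq_false_iff]
    intro hc
    rcases (pvScan_iff _ _).1 hc with ⟨h, hm, hi⟩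
    rw [List.any_eq_false] at hb
    exact hb h hm ((PySem.Str.isIn_iff_infix h a).2 hi)
  · rcases List.any_eq_true.1 hb with ⟨h, hm, hIn⟩
    exact (pvScan_iff _ _).2 ⟨h, hm, (PySem.Str.isIn_iff_infix h a).1 hIn⟩

-- A's inner break loop = mark iff B's scan succeeds
theorem pvMarkOne_eq (a : String) (hl_list : List String) :
    pvMarkOne a hl_list = (if pvScan hl_list a.toList then "<mark>" ++ a ++ "</mark>" else a) := by
  rw [pvScan_eq_any]
  induction hl_list with
  | nil => simp [pvMarkOne]
  | cons hl rest ih =>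
      simp only [pvMarkOne, List.any_cons]
      by_cases hIn : PySem.Str.isIn hl a = true
      all_goals
        simp only [Bool.not_eq_true, PySem.Str.isIn_eq] at hIn
        simp [hIn, ih]

-- ===== VERDICT (by name: the statement is the Claim_ definition above) =====
theorem highlight_authors_in_list_spec : Claim_equal_highlight_authors_in_list := by
  intro author_list hl_list _
  show _ = _
  unfold highlight_authors_in_list highlight_authors_in_list_alt
  rw [PySem.List.foldl_append_singleton_eq_map]
  exact List.map_congr_left (fun a _ => pvMarkOne_eq a hl_list)
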